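-- pv_equiv track=rewrite | github.com/Corayu0323/consumer_behavoir_tree | src/ood/detector.py | detect_causal_ood
-- ===== SOURCE A (Python) =====
-- from typing import Iterable, List, Tuple, Any
--
-- def detect_causal_ood(seq: List[Any]) -> bool:
--     """
--     Rule-based Causal / Logic OOD detection.
--     seq: List[(cluster_id, type_code, ...)]
--     """
--     if not seq:
--         return False
--
--     type_codes = [x[1] for x in seq]  # second field is type_code
--
--     # Rule 1: strong stage reversal (e.g., 4 -> 1, 3 -> 1)
--     for i in range(1, len(type_codes)):
--         if type_codes[i - 1] - type_codes[i] >= 2: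
--             return True
--
--     # Rule 2: too-early purchase (buy happens in first 2 steps)
--     if 4 in type_codes:
--         first_buy_pos = type_codes.index(4)
--         if first_buy_pos <= 1:
--             return True
--
--     return False
-- ===== SOURCE B (Python) =====
-- def detect_causal_ood(seq):
--     """Single fused pass over seq: track the previous type_code and the index;
--     fire Rule 1 (stage reversal) or Rule 2 (purchase in first two steps)
--     as soon as either is seen."""
--     prev = None
--     for i, x in enumerate(seq):
--         tc = x[1]
--         if prev is not None and prev - tc >= 2:
--             return True
--         if tc == 4 and i <= 1:
--             return True
--         prev = tc
--     return False
-- ===== Notes on version B (the rewrite author's own statement) =====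
-- stated objective: simpler
-- what changed: Replaces the materialized type_codes list plus two separate scans (an index loop for Rule 1 and contains/index for Rule 2) with one fused enumerate loop that keeps only the previous type_code and fires either rule on the spot.
import Mathlib
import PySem

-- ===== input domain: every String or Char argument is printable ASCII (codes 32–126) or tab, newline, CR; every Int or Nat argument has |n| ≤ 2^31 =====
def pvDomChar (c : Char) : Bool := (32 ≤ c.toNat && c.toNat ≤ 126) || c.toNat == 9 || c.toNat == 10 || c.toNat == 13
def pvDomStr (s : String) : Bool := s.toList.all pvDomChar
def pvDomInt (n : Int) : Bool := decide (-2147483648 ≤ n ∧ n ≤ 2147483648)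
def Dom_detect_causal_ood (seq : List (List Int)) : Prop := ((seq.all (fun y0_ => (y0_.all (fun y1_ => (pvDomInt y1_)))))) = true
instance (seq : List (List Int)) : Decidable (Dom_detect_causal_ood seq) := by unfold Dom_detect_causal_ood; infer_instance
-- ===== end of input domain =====

-- B fuses A's list-comprehension + two scans into one enumerate loop with a `prev` register (objective: simpler).
-- ===== PORT A =====
def detect_causal_ood (seq : List (List Int)) : Bool :=
  if seq = [] then false
  else
    let type_codes := seq.map (fun x => PySem.List.pyGetD x 1 0)
    if (PySem.List.pyRange 1 (PySem.List.len type_codes) 1).any (fun i =>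
        decide (PySem.List.pyGetD type_codes (i - 1) 0 - PySem.List.pyGetD type_codes i 0 ≥ 2)) then
      true
    else if type_codes.contains 4 then
      match PySem.List.index? type_codes 4 with
      | some first_buy_pos => decide (first_buy_pos ≤ 1)
      | none => false
    else false

-- ===== PORT B =====
-- the fused loop: i = current index, prev = previous type_code (none at the start)
def pvAltGo (rest : List (List Int)) (i : Nat) (prev : Option Int) : Bool :=
  match rest with
  | [] => false
  | x :: rest' =>
    let tc := PySem.List.pyGetD x 1 0
    if (match prev with | some p => decide (p - tc ≥ 2) | none => false) then true
    else if tc == 4 && decide (i ≤ 1) then true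
    else pvAltGo rest' (i + 1) (some tc)

def detect_causal_ood_alt (seq : List (List Int)) : Bool :=
  pvAltGo seq 0 none

-- ===== PRECONDITION & SPEC =====
-- Pre_ excludes exactly the inputs on which Python A raises IndexError: some tuple has fewer than 2 fields (x[1] fails).
def Pre_detect_causal_ood (seq : List (List Int)) : Prop := ∀ x ∈ seq, 2 ≤ x.length
instance (seq : List (List Int)) : Decidable (Pre_detect_causal_ood seq) := by unfold Pre_detect_causal_ood; infer_instance
def pvWitness_detect_causal_ood : List (List Int) := [[0, 1], [0, 4]]

def Spec_detect_causal_ood (seq : List (List Int)) (out : Bool) : Prop := out = detect_causal_ood_alt seq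
instance (seq : List (List Int)) (out : Bool) : Decidable (Spec_detect_causal_ood seq out) := by unfold Spec_detect_causal_ood; infer_instance

-- ===== CLAIM (what is proved, stated in full; the proofs are below) =====
def Claim_equal_detect_causal_ood : Prop := ∀ (seq : List (List Int)), Dom_detect_causal_ood seq → Pre_detect_causal_ood seq → Spec_detect_causal_ood seq (detect_causal_ood seq)

-- ===== LEMMAS AND PROOFS =====

-- adjacent-pair form of Rule 1
def pvAdj : List Int → Bool
  | a :: b :: ts => decide (a - b ≥ 2) || pvAdj (b :: ts)
  | _ => false

-- A's Rule-1 range loop equals the adjacent-pair scan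
lemma pvRange_any_adj (tcs : List Int) :
    (List.range (tcs.length - 1)).any
      (fun k => decide (tcs.getD k 0 - tcs.getD (k + 1) 0 ≥ 2)) = pvAdj tcs := by
  induction tcs with
  | nil => simp [pvAdj]
  | cons a rest ih =>
    match rest with
    | [] => simp [pvAdj]
    | b :: ts =>
      rw [show (a :: b :: ts).length - 1 = ((b :: ts).length - 1) + 1 by simp,
          List.range_succ_eq_map, List.any_cons, List.any_map]
      simp only [Function.comp_def, List.getD_cons_succ, List.getD_cons_zero] at ih ⊢
      rw [ih, pvAdj]

lemma pvRule1_eq_adj (tcs : List Int) :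
    (PySem.List.pyRange 1 (PySem.List.len tcs) 1).any (fun i =>
        decide (PySem.List.pyGetD tcs (i - 1) 0 - PySem.List.pyGetD tcs i 0 ≥ 2)) = pvAdj tcs := by
  rw [PySem.List.pyRange_one, List.any_map, ← pvRange_any_adj tcs]
  simp only [PySem.List.len_eq]
  rw [show (((tcs.length : Int)) - 1).toNat = tcs.length - 1 from by omega]
  congr 1
  funext k
  have h2 : (1 : Int) + (k : Int) = (((k + 1 : Nat)) : Int) := by push_cast; ring
  simp only [Function.comp_def, h2, PySem.List.pyGetD_natCast]
  rw [show (((k + 1 : Nat)) : Int) - 1 = ((k : Nat) : Int) from by push_cast; ring,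
      PySem.List.pyGetD_natCast]

-- A's Rule-2 branch equals "4 among the first two entries"
lemma pvRule2_eq_take2 (tcs : List Int) :
    (if tcs.contains 4 then
      match PySem.List.index? tcs 4 with
      | some p => decide (p ≤ 1)
      | none => false
     else false) = (tcs.take 2).contains 4 := by
  match tcs with
  | [] => simp
  | [a] =>
    by_cases ha : a = 4
    · subst ha; rw [PySem.List.index?_cons_self]; simp
    · rw [PySem.List.index?_cons_of_ne _ ha,
          show PySem.List.index? ([] : List Int) 4 = none from rfl]
      simp [Ne.symm ha]
  | a :: b :: ts =>
    by_cases ha : a = 4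
    · subst ha; rw [PySem.List.index?_cons_self]; simp
    · rw [PySem.List.index?_cons_of_ne _ ha]
      by_cases hb : b = 4
      · subst hb; rw [PySem.List.index?_cons_self]; simp [Ne.symm ha]
      · rw [PySem.List.index?_cons_of_ne _ hb]
        cases h : PySem.List.index? ts 4 with
        | none =>
          have h4 : (4 : Int) ∉ ts := (PySem.List.index?_eq_none_iff _ _).mp h
          simp [Ne.symm ha, Ne.symm hb, h4]
        | some k =>
          have h4 : (4 : Int) ∈ ts := (PySem.List.index?_isSome_iff _ _).mp (by rw [h]; rfl)
          simp [Ne.symm ha, Ne.symm hb, h4]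

-- once i ≥ 2 the fused loop is exactly the adjacent-pair scan seeded with prev
lemma pvAltGo_ge2 (ts : List (List Int)) (p : Int) (i : Nat) (h : 2 ≤ i) :
    pvAltGo ts i (some p) = pvAdj (p :: ts.map (fun x => PySem.List.pyGetD x 1 0)) := by
  induction ts generalizing p i with
  | nil => simp [pvAltGo, pvAdj]
  | cons x rest ih =>
    rw [pvAltGo]
    have hi : decide (i ≤ 1) = false := by simp; omega
    simp only [hi, Bool.and_false]
    rw [ih _ (i + 1) (by omega)]
    simp only [List.map_cons, pvAdj]
    by_cases hc : p - PySem.List.pyGetD x 1 0 ≥ 2 <;> simp [hc]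

-- the full fused run equals Rule-1-anywhere OR 4-in-the-first-two
lemma pvAltGo_run (seq : List (List Int)) :
    pvAltGo seq 0 none =
      (pvAdj (seq.map (fun y => PySem.List.pyGetD y 1 0)) ||
       ((seq.map (fun y => PySem.List.pyGetD y 1 0)).take 2).contains 4) := by
  match seq with
  | [] => rfl
  | [x] =>
    simp only [pvAltGo]
    simp [pvAdj, eq_comm (a := (4 : Int))]
  | x :: y :: rest' =>
    simp only [pvAltGo]
    rw [pvAltGo_ge2 rest' _ 2 (by omega)]
    by_cases h1 : PySem.List.pyGetD x 1 0 - PySem.List.pyGetD y 1 0 ≥ 2 <;>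
    by_cases h2 : PySem.List.pyGetD x 1 0 = 4 <;>
    by_cases h3 : PySem.List.pyGetD y 1 0 = 4 <;>
    simp [h1, h2, h3, pvAdj, eq_comm (a := (4 : Int))]

theorem pv_main (seq : List (List Int)) :
    detect_causal_ood seq = detect_causal_ood_alt seq := by
  match seq with
  | [] => rfl
  | x :: rest =>
    show (if (x :: rest) = [] then false else _) = _
    rw [if_neg (by simp)]
    show (if (PySem.List.pyRange 1 (PySem.List.len ((x :: rest).map (fun y => PySem.List.pyGetD y 1 0))) 1).any (fun i =>
        decide (PySem.List.pyGetD ((x :: rest).map (fun y => PySem.List.pyGetD y 1 0)) (i - 1) 0 -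
                PySem.List.pyGetD ((x :: rest).map (fun y => PySem.List.pyGetD y 1 0)) i 0 ≥ 2)) then true
      else if ((x :: rest).map (fun y => PySem.List.pyGetD y 1 0)).contains 4 then
        match PySem.List.index? ((x :: rest).map (fun y => PySem.List.pyGetD y 1 0)) 4 with
        | some p => decide (p ≤ 1)
        | none => false
      else false) = detect_causal_ood_alt (x :: rest)
    rw [pvRule1_eq_adj]
    show _ = pvAltGo (x :: rest) 0 none
    rw [pvAltGo_run, ← pvRule2_eq_take2]
    cases pvAdj ((x :: rest).map (fun y => PySem.List.pyGetD y 1 0)) <;> simp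

-- ===== VERDICT (by name: the statement is the Claim_ definition above) =====
theorem detect_causal_ood_spec : Claim_equal_detect_causal_ood := by
  intro seq _ _
  exact pv_main seq
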